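-- pv_equiv track=rewrite | github.com/theHdd4/TrinityFastAPIDjangoReact | TrinityBackendDjango/config/settings.py | _expand_origins
-- ===== SOURCE A (Python) =====
-- def _expand_origins(hosts: list[str], ports: list[str]) -> list[str]:
--     """Expand hostnames/IPs into http/https origins for multiple ports."""
--
--     origins: list[str] = []
--     seen: set[str] = set()
--     for host in hosts:
--         host = host.strip()
--         if not host:
--             continue
--         if host.startswith("http://") or host.startswith("https://"):
--             if host not in seen:
--                 seen.add(host)
--                 origins.append(host)
--             continue
--         for port in ports:
--             origin = f"http://{host}:{port}"
--             if origin not in seen: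
--                 seen.add(origin)
--                 origins.append(origin)
--         https_origin = f"https://{host}"
--         if https_origin not in seen:
--             seen.add(https_origin)
--             origins.append(https_origin)
--     return origins
-- ===== SOURCE B (Python) =====
-- def _expand_origins(hosts: list[str], ports: list[str]) -> list[str]:
--     """Expand hostnames/IPs into http/https origins for multiple ports."""
--     flat: list[str] = []
--     for host in hosts:
--         host = host.strip()
--         if not host:
--             continue
--         if host.startswith("http://") or host.startswith("https://"):
--             flat.append(host)
--         else:
--             for port in ports:
--                 flat.append(f"http://{host}:{port}")
--             flat.append(f"https://{host}")
--     first_pos: dict[str, int] = {}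
--     for i in range(len(flat) - 1, -1, -1):
--         first_pos[flat[i]] = i
--     return [c for i, c in enumerate(flat) if first_pos[c] == i]
-- ===== Notes on version B (the rewrite author's own statement) =====
-- stated objective: alternative
-- what changed: B performs no membership test and keeps no seen-set while emitting: it generates the full candidate stream undeduplicated, computes each candidate's first-occurrence position by one backward overwrite pass over a position map, and keeps a candidate iff it stands at its own first position.
import Mathlib
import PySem

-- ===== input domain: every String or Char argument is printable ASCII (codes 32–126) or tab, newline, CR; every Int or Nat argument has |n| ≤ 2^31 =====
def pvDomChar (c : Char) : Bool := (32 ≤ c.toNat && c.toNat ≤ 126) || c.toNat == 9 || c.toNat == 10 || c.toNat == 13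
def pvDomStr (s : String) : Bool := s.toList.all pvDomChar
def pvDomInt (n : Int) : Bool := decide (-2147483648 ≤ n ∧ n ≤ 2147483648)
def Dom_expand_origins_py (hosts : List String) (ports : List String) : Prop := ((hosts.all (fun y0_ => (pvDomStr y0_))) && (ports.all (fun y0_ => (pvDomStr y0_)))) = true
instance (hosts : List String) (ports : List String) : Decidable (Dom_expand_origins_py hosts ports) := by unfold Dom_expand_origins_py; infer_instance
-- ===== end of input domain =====

-- B keeps no seen-set while emitting: it generates the full candidate stream undeduplicated,
-- records first-occurrence positions by one backward overwrite pass over a position map, and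
-- keeps each candidate iff it stands at its own first position. Objective: alternative.

-- ===== PORT A =====
def expand_origins_py (hosts : List String) (ports : List String) : List String :=
  (hosts.foldl (fun st host =>
      let h := PySem.Str.strip host
      if h = "" then st
      else if PySem.Str.startswith h "http://" || PySem.Str.startswith h "https://" then
        (if PySem.Set.contains st.2 h then st else (st.1 ++ [h], PySem.Set.add st.2 h))
      else
        let st1 := ports.foldl (fun st port =>
          let origin := "http://" ++ h ++ ":" ++ port
          if PySem.Set.contains st.2 origin then st
          else (st.1 ++ [origin], PySem.Set.add st.2 origin)) st
        let https_origin := "https://" ++ h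
        if PySem.Set.contains st1.2 https_origin then st1
        else (st1.1 ++ [https_origin], PySem.Set.add st1.2 https_origin))
    (([] : List String), (PySem.Set.empty : PySem.Set String))).1

-- ===== PORT B =====
def expand_origins_py_alt (hosts : List String) (ports : List String) : List String :=
  -- pass 1: the full candidate stream, no dedup
  let flat := hosts.foldl (fun acc host =>
    let h := PySem.Str.strip host
    if h = "" then acc
    else if PySem.Str.startswith h "http://" || PySem.Str.startswith h "https://" then
      acc ++ [h]
    else
      (ports.foldl (fun acc port => acc ++ ["http://" ++ h ++ ":" ++ port]) acc)
        ++ ["https://" ++ h]) []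
  -- pass 2: backward overwrite records each candidate's first position
  let first_pos := (PySem.List.pyRange ((flat.length : Int) - 1) (-1) (-1)).foldl
    (fun d i => d.insert (PySem.List.pyGetD flat i "") i)
    (PySem.Dict.empty : PySem.Dict String Int)
  -- pass 3: keep a candidate iff it stands at its first position
  ((PySem.List.enumerate flat 0).filter
    (fun ic => first_pos.getD ic.2 0 == ic.1)).map (fun ic => ic.2)

-- ===== PRECONDITION & SPEC =====
def Spec_expand_origins_py (hosts : List String) (ports : List String) (out : List String) : Prop := out = expand_origins_py_alt hosts ports
instance (hosts : List String) (ports : List String) (out : List String) : Decidable (Spec_expand_origins_py hosts ports out) := by unfold Spec_expand_origins_py; infer_instance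

-- ===== CLAIM =====
def Claim_equal_expand_origins_py : Prop := ∀ (hosts : List String) (ports : List String), Dom_expand_origins_py hosts ports → Spec_expand_origins_py hosts ports (expand_origins_py hosts ports)

-- ===== LEMMAS AND PROOFS =====

-- candidate origins A would consider for one host, in A's order
def pvCand (ports : List String) (host : String) : List String :=
  let h := PySem.Str.strip host
  if h = "" then []
  else if PySem.Str.startswith h "http://" || PySem.Str.startswith h "https://" then [h]
  else ports.map (fun port => "http://" ++ h ++ ":" ++ port) ++ ["https://" ++ h]

-- reference: keep-first dedup of xs relative to an already-seen list s
def pvDed (s : List String) : List String → List String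
  | [] => []
  | x :: xs => if s.contains x then pvDed s xs else x :: pvDed (s ++ [x]) xs

-- A's generic dedup loop, from state (acc, s), appends pvDed s xs and updates the set
lemma pv_emit (xs : List String) (acc : List String) (s : PySem.Set String) :
    xs.foldl (fun st x => if PySem.Set.contains st.2 x then st
        else (st.1 ++ [x], PySem.Set.add st.2 x)) (acc, s)
      = (acc ++ pvDed s xs, xs.foldl PySem.Set.add s) := by
  induction xs generalizing acc s with
  | nil => simp [pvDed]
  | cons x xs ih =>
    simp only [List.foldl_cons]
    by_cases h : x ∈ s
    · rw [if_pos (by simpa [PySem.Set.contains_iff] using h)]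
      rw [ih, pvDed, if_pos (by simpa using h), PySem.Set.add_of_mem h]
    · rw [if_neg (by simp [h])]
      rw [ih, pvDed, if_neg (by simpa using h), PySem.Set.add_of_not_mem h]
      simp

-- pvDed splits over append
lemma pv_ded_append (xs ys s : List String) :
    pvDed s (xs ++ ys) = pvDed s xs ++ pvDed (xs.foldl PySem.Set.add s) ys := by
  induction xs generalizing s with
  | nil => simp [pvDed]
  | cons x xs ih =>
    by_cases h : x ∈ s
    · rw [List.cons_append, pvDed, if_pos (by simpa using h), pvDed,
        if_pos (by simpa using h), ih, List.foldl_cons, PySem.Set.add_of_mem h]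
    · rw [List.cons_append, pvDed, if_neg (by simpa using h), pvDed,
        if_neg (by simpa using h), ih, List.foldl_cons, PySem.Set.add_of_not_mem h,
        List.cons_append]

-- pvDed from seen s is a filter of pvDed from nothing
lemma pv_ded_filter (ys s : List String) :
    pvDed s ys = (pvDed [] ys).filter (fun x => !s.contains x) := by
  induction ys generalizing s with
  | nil => simp [pvDed]
  | cons x ys ih =>
    have hnil : pvDed [] (x :: ys) = x :: pvDed [x] ys := by
      rw [pvDed, if_neg (by simp)]; rfl
    by_cases h : x ∈ s
    · rw [pvDed, if_pos (by simpa using h), ih, hnil, List.filter_cons_of_neg (by simpa using h),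
        ih [x], List.filter_filter]
      apply List.filter_congr
      intro a _
      by_cases ha : a ∈ s
      · simp [ha]
      · have hax : a ≠ x := by rintro rfl; exact ha h
        simp [ha, hax]
    · rw [pvDed, if_neg (by simpa using h), ih, hnil,
        List.filter_cons_of_pos (by simpa using h), ih [x], List.filter_filter]
      congr 1
      apply List.filter_congr
      intro a _
      by_cases hax : a = x
      · subst hax; simp [h]
      · by_cases ha : a ∈ s <;> simp [ha, hax]

-- A's per-host step
lemma pv_host (ports : List String) (host : String) (acc : List String) (s : PySem.Set String) :
    (let h := PySem.Str.strip host
     if h = "" then (acc, s)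
     else if PySem.Str.startswith h "http://" || PySem.Str.startswith h "https://" then
       (if PySem.Set.contains s h then (acc, s) else (acc ++ [h], PySem.Set.add s h))
     else
       let st1 := ports.foldl (fun st port =>
         let origin := "http://" ++ h ++ ":" ++ port
         if PySem.Set.contains st.2 origin then st
         else (st.1 ++ [origin], PySem.Set.add st.2 origin)) (acc, s)
       let https_origin := "https://" ++ h
       if PySem.Set.contains st1.2 https_origin then st1
       else (st1.1 ++ [https_origin], PySem.Set.add st1.2 https_origin))
      = (acc ++ pvDed s (pvCand ports host), (pvCand ports host).foldl PySem.Set.add s) := by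
  by_cases he : PySem.Str.strip host = ""
  · simp [pvCand, he, pvDed]
  · by_cases hp : (PySem.Str.startswith (PySem.Str.strip host) "http://"
        || PySem.Str.startswith (PySem.Str.strip host) "https://") = true
    · simp only [pvCand, he, hp, if_true, if_false]
      by_cases hm : PySem.Str.strip host ∈ s
      · rw [if_pos (by simpa using hm)]
        simp [pvDed, hm]
      · rw [if_neg (by simp [hm])]
        simp [pvDed, hm]
    · simp only [pvCand, he, hp, Bool.false_eq_true, if_false]
      have hinner : ports.foldl (fun st port =>
          let origin := "http://" ++ PySem.Str.strip host ++ ":" ++ port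
          if PySem.Set.contains st.2 origin then st
          else (st.1 ++ [origin], PySem.Set.add st.2 origin)) (acc, s)
          = (acc ++ pvDed s (ports.map (fun port => "http://" ++ PySem.Str.strip host ++ ":" ++ port)),
             (ports.map (fun port => "http://" ++ PySem.Str.strip host ++ ":" ++ port)).foldl PySem.Set.add s) := by
        rw [← pv_emit, List.foldl_map]
      rw [hinner, pv_ded_append, List.foldl_append]
      set M := ports.map (fun port => "http://" ++ PySem.Str.strip host ++ ":" ++ port) with hM
      set s1 := M.foldl PySem.Set.add s with hs1
      by_cases hm : ("https://" ++ PySem.Str.strip host) ∈ s1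
      · rw [if_pos (by simpa using hm)]
        simp [pvDed, hm]
      · rw [if_neg (by simp [hm])]
        simp [pvDed, hm]

-- A's whole loop
lemma pv_A_eq (hosts ports : List String) (acc : List String) (s : PySem.Set String) :
    hosts.foldl (fun st host =>
      let h := PySem.Str.strip host
      if h = "" then st
      else if PySem.Str.startswith h "http://" || PySem.Str.startswith h "https://" then
        (if PySem.Set.contains st.2 h then st else (st.1 ++ [h], PySem.Set.add st.2 h))
      else
        let st1 := ports.foldl (fun st port =>
          let origin := "http://" ++ h ++ ":" ++ port
          if PySem.Set.contains st.2 origin then st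
          else (st.1 ++ [origin], PySem.Set.add st.2 origin)) st
        let https_origin := "https://" ++ h
        if PySem.Set.contains st1.2 https_origin then st1
        else (st1.1 ++ [https_origin], PySem.Set.add st1.2 https_origin)) (acc, s)
      = (acc ++ pvDed s (hosts.flatMap (pvCand ports)),
         (hosts.flatMap (pvCand ports)).foldl PySem.Set.add s) := by
  induction hosts generalizing acc s with
  | nil => simp [pvDed]
  | cons host hosts ih =>
    rw [List.foldl_cons, List.flatMap_cons]
    have hh := pv_host ports host acc s
    simp only at hh ⊢
    rw [hh, ih, pv_ded_append, List.foldl_append, List.append_assoc]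

-- a foldl that overwrites dict entries: the LAST write to a key wins
lemma pv_getD_foldl_insert (L : List Int) (f : Int → String) (d : PySem.Dict String Int)
    (c : String) (v : Int) :
    (L.foldl (fun d i => d.insert (f i) i) d).getD c v =
      match L.reverse.find? (fun i => f i == c) with
      | some i => i
      | none => d.getD c v := by
  induction L generalizing d with
  | nil => simp
  | cons i L ih =>
    rw [List.foldl_cons, ih, List.reverse_cons, List.find?_append]
    cases hf : L.reverse.find? (fun i => f i == c) with
    | some j => simp
    | none =>
      simp only [Option.none_or]
      by_cases hc : f i = c
      · subst hc
        simp [PySem.Dict.getD_insert_self]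
      · rw [show List.find? (fun i => f i == c) [i] = none by
          simp [hc]]
        rw [PySem.Dict.getD_insert_of_ne]
        exact fun h => hc (Eq.symm h)

-- forward find? of the first matching index over the index range is index?
lemma pv_find_off (xs : List String) (c : String) (pre : List String) :
    (PySem.List.pyRange (pre.length : Int) ((pre.length : Int) + (xs.length : Int)) 1).find?
        (fun i => PySem.List.pyGetD (pre ++ xs) i "" == c)
      = (PySem.List.index? xs c).map (fun k => (pre.length : Int) + (k : Int)) := by
  induction xs generalizing pre with
  | nil =>
    rw [PySem.List.pyRange_one_eq_nil (by simp)]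
    simp [PySem.List.index?_eq_idxOf?]
  | cons x xs ih =>
    rw [PySem.List.pyRange_one_cons (by push_cast [List.length_cons]; omega), List.find?_cons]
    have hx : PySem.List.pyGetD (pre ++ x :: xs) ((pre.length : Nat) : Int) "" = x := by
      rw [PySem.List.pyGetD_natCast]
      simp [List.getD]
    by_cases hxc : x = c
    · subst hxc
      rw [show (PySem.List.pyGetD (pre ++ x :: xs) (pre.length : Int) "" == x) = true by
        simp [hx], PySem.List.index?_cons_self]
      simp
    · rw [show (PySem.List.pyGetD (pre ++ x :: xs) (pre.length : Int) "" == c) = false by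
        simp [hx, hxc]]
      have harr : (pre.length : Int) + ((x :: xs).length : Int)
          = ((pre ++ [x]).length : Int) + (xs.length : Int) := by
        simp; omega
      have hlist : pre ++ x :: xs = (pre ++ [x]) ++ xs := by simp
      have hlen : ((pre ++ [x]).length : Int) = (pre.length : Int) + 1 := by simp
      rw [harr, hlist, show (pre.length : Int) + 1 = ((pre ++ [x]).length : Int) from hlen.symm,
        ih (pre ++ [x]), PySem.List.index?_cons_of_ne xs hxc]
      cases PySem.List.index? xs c with
      | none => simp
      | some k =>
        simp
        ring

-- the pre = [] instance of pv_find_off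
lemma pv_find_zero (xs : List String) (c : String) :
    (PySem.List.pyRange 0 (xs.length : Int) 1).find?
        (fun i => PySem.List.pyGetD xs i "" == c)
      = (PySem.List.index? xs c).map (fun k => (k : Int)) := by
  have h := pv_find_off xs c []
  simpa using h

-- pvDed relative to a seen prefix is the positional filter against the full list
lemma pv_ded_enum (pre xs : List String) :
    pvDed pre xs = ((PySem.List.enumerate xs (pre.length : Int)).filter
        (fun ic => (PySem.List.index? (pre ++ xs) ic.2).map (fun k => (k : Int))
          == some ic.1)).map (fun ic => ic.2) := by
  induction xs generalizing pre with
  | nil => simp [pvDed]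
  | cons x xs ih =>
    rw [PySem.List.enumerate_cons, List.filter_cons]
    have htail : pvDed (pre ++ [x]) xs
        = ((PySem.List.enumerate xs ((pre.length : Int) + 1)).filter
            (fun ic => (PySem.List.index? (pre ++ x :: xs) ic.2).map (fun k => (k : Int))
              == some ic.1)).map (fun ic => ic.2) := by
      have h1 := ih (pre ++ [x])
      rw [show (pre ++ [x]) ++ xs = pre ++ x :: xs by simp] at h1
      rw [show (((pre ++ [x]).length : Nat) : Int) = (pre.length : Int) + 1 by push_cast [List.length_append, List.length_singleton]; omega] at h1
      exact h1
    by_cases hx : x ∈ pre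
    · have hidx : PySem.List.index? (pre ++ x :: xs) x = PySem.List.index? pre x :=
        PySem.List.index?_append_of_mem (x :: xs) hx
      have hmem : (PySem.List.index? pre x).isSome := (PySem.List.index?_isSome_iff pre x).mpr hx
      obtain ⟨k, hk⟩ := Option.isSome_iff_exists.mp hmem
      have hklt : k < pre.length := by
        obtain ⟨pre1, suf, hsplit, hlen, -⟩ := (PySem.List.index?_eq_some_iff pre x k).mp hk
        subst hsplit
        simp [← hlen]
      have hfalse : ((PySem.List.index? (pre ++ x :: xs) x).map (fun k => (k : Int))
          == some ((pre.length : Nat) : Int)) = false := by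
        rw [hidx, hk]
        have hne : (k : Int) ≠ ((pre.length : Nat) : Int) := by
          exact_mod_cast Nat.ne_of_lt hklt
        simp [hne]
      rw [pvDed, if_pos (by simpa using hx)]
      have hcong : pvDed pre xs = pvDed (pre ++ [x]) xs := by
        rw [pv_ded_filter xs pre, pv_ded_filter xs (pre ++ [x])]
        apply List.filter_congr
        intro a _
        congr 1
        by_cases ha : a ∈ pre
        · simp [ha]
        · have hax : a ≠ x := fun h => ha (h ▸ hx)
          simp [ha, hax]
      rw [hcong, htail]
      simp only [hfalse, Bool.false_eq_true, if_false]
    · have hsome : PySem.List.index? (pre ++ x :: xs) x = some pre.length :=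
        (PySem.List.index?_eq_some_iff (pre ++ x :: xs) x pre.length).mpr ⟨pre, xs, rfl, rfl, hx⟩
      have htrue : ((PySem.List.index? (pre ++ x :: xs) x).map (fun k => (k : Int))
          == some ((pre.length : Nat) : Int)) = true := by
        rw [hsome]; simp
      rw [pvDed, if_neg (by simpa using hx)]
      rw [htail]
      simp only [htrue, if_true, List.map_cons]


-- B's flat candidate stream is the flatMap of per-host candidate blocks
lemma pv_flat_eq (hosts ports : List String) (acc : List String) :
    hosts.foldl (fun acc host =>
      let h := PySem.Str.strip host
      if h = "" then acc
      else if PySem.Str.startswith h "http://" || PySem.Str.startswith h "https://" then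
        acc ++ [h]
      else
        (ports.foldl (fun acc port => acc ++ ["http://" ++ h ++ ":" ++ port]) acc)
          ++ ["https://" ++ h]) acc
      = acc ++ hosts.flatMap (pvCand ports) := by
  induction hosts generalizing acc with
  | nil => simp
  | cons host hosts ih =>
    rw [List.foldl_cons, List.flatMap_cons, ih, ← List.append_assoc]
    congr 1
    by_cases he : PySem.Str.strip host = ""
    · simp only [pvCand, he, if_true, List.append_nil]
    · by_cases hp : (PySem.Str.startswith (PySem.Str.strip host) "http://"
          || PySem.Str.startswith (PySem.Str.strip host) "https://") = true
      · simp only [pvCand, he, hp, if_true, if_false]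
      · simp only [pvCand, he, hp, Bool.false_eq_true, if_false]
        rw [PySem.List.foldl_append_singleton_eq_map, List.append_assoc]

-- B equals the keep-first dedup of the flat candidate stream
lemma pv_B_eq (hosts ports : List String) :
    expand_origins_py_alt hosts ports = pvDed [] (hosts.flatMap (pvCand ports)) := by
  simp only [expand_origins_py_alt, pv_flat_eq hosts ports [], List.nil_append]
  rw [pv_ded_enum [] (hosts.flatMap (pvCand ports))]
  simp only [List.nil_append, List.length_nil, Nat.cast_zero]
  congr 1
  apply List.filter_congr
  intro ic hic
  obtain ⟨k, hk, hic⟩ := (PySem.List.mem_enumerate_iff (hosts.flatMap (pvCand ports)) 0 ic).mp hic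
  subst hic
  have hmem : (hosts.flatMap (pvCand ports))[k] ∈ hosts.flatMap (pvCand ports) :=
    List.getElem_mem hk
  rw [pv_getD_foldl_insert, PySem.List.pyRange_neg_one_eq_reverse, List.reverse_reverse,
    show (-1 : Int) + 1 = 0 by ring,
    show ((hosts.flatMap (pvCand ports)).length : Int) - 1 + 1
      = ((hosts.flatMap (pvCand ports)).length : Int) by ring,
    pv_find_zero]
  obtain ⟨k0, hk0⟩ := Option.isSome_iff_exists.mp
    ((PySem.List.index?_isSome_iff (hosts.flatMap (pvCand ports))
      ((hosts.flatMap (pvCand ports))[k])).mpr hmem)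
  rw [hk0]
  simp


-- ===== VERDICT =====
theorem expand_origins_py_spec : Claim_equal_expand_origins_py := by
  intro hosts ports _
  show expand_origins_py hosts ports = expand_origins_py_alt hosts ports
  unfold expand_origins_py
  rw [show (PySem.Set.empty : PySem.Set String) = ([] : List String) from rfl, pv_A_eq, pv_B_eq]
  rfl
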